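-- pv_equiv track=rewrite | github.com/nicgambalva/AMP-Volatilty-Managed-Portfolios | portfolio_builder.py | identify_future
-- ===== SOURCE A (Python) =====
-- FUTURES_EURO_INDICES = {
--     'DAX30': 'GX1 Index', # Germany: DAX 30
--     'CAC40': 'CF1 Index', # France: CAC 40
--     'FTSE Athens 20': 'AJ1 Index', # Greece: FTSE/ATHEX 20
--     'FTSE MIB': 'ST1 Index', # Italy: FTSE MIB
--     'AEX': 'EO1 Index', # Netherlands: AEX
--     'PSI 20': 'PP1 Index', # Portugal: PSI 20
--     'IBEX35': 'IB1 Index', # Spain: IBEX 35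
--     'BEL20': 'BE1 Index' # Belgium: BEL 20
-- }
--
-- FUTURES_METALS = {
--     'Gold': 'GC1 Comdty', # Gold - CMX-COMEX division of NYMEX
--     'Silver': 'SI1 Comdty', # Silver - CMX-COMEX division of NYMEX
--     'Platinum': 'PL1 Comdty', # Platinum - NYM-NYMEX Exchange
--     'Palladium': 'PA1 Comdty', # Palladium - NYM-NYMEX Exchange
--     'Nickel': 'LN1 Comdty', # Nickel - LME-LME Benchmark Monitor
--     'Zinc': 'LX1 Comdty', # Zinc - LME-LME Benchmark Monitor
--     'Tin': 'LT1 Comdty', # Tin - LME-LME Benchmark Monitor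
--     'Copper': 'LP1 Comdty', # Copper - LME-LME Benchmark Monitor
--     'Aluminium': 'LA1 Comdty' # Aluminium - LME-LME Benchmark Monitor
-- }
--
-- def identify_future(name, future_class = None):
--     """Identifies the future based on the name and the class of the future."""
--     if future_class not in ['INDEX', 'METAL', None]:
--         raise ValueError("Future class must be 'INDEX', 'METAL', or None.")
--     identifier = name[:2]
--     if future_class == 'INDEX':
--         for future in FUTURES_EURO_INDICES.values():
--             if future[:2] == identifier:
--                 return future
--     elif future_class == 'METAL':
--         for future in FUTURES_METALS.values():
--             if future[:2] == identifier:
--                 return future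
--     else:
--         for future in FUTURES_EURO_INDICES.values():
--             if future[:2] == identifier:
--                 return future
--         for future in FUTURES_METALS.values():
--             if future[:2] == identifier:
--                 return future
--     raise ValueError(f"Future {name} not found in any data.")
-- ===== SOURCE B (Python) =====
-- FUTURES_EURO_INDICES = {
--     'DAX30': 'GX1 Index',
--     'CAC40': 'CF1 Index',
--     'FTSE Athens 20': 'AJ1 Index',
--     'FTSE MIB': 'ST1 Index',
--     'AEX': 'EO1 Index',
--     'PSI 20': 'PP1 Index',
--     'IBEX35': 'IB1 Index',
--     'BEL20': 'BE1 Index'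
-- }
--
-- FUTURES_METALS = {
--     'Gold': 'GC1 Comdty',
--     'Silver': 'SI1 Comdty',
--     'Platinum': 'PL1 Comdty',
--     'Palladium': 'PA1 Comdty',
--     'Nickel': 'LN1 Comdty',
--     'Zinc': 'LX1 Comdty',
--     'Tin': 'LT1 Comdty',
--     'Copper': 'LP1 Comdty',
--     'Aluminium': 'LA1 Comdty'
-- }
--
-- # One combined table: 2-char prefix -> (full code, class tag).  The 17 prefixes
-- # are pairwise distinct, so a single lookup + class filter reproduces A's
-- # branch-then-scan behaviour exactly.
-- _COMBINED = {}
-- for _tag, _table in (('INDEX', FUTURES_EURO_INDICES), ('METAL', FUTURES_METALS)):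
--     for _v in _table.values():
--         _COMBINED[_v[:2]] = (_v, _tag)
--
-- def identify_future(name, future_class=None):
--     """Identifies the future based on the name and the class of the future."""
--     if future_class not in ('INDEX', 'METAL', None):
--         raise ValueError("Future class must be 'INDEX', 'METAL', or None.")
--     hit = _COMBINED.get(name[:2])
--     if hit is not None and (future_class is None or future_class == hit[1]):
--         return hit[0]
--     raise ValueError(f"Future {name} not found in any data.")
-- ===== Notes on version B (the rewrite author's own statement) =====
-- stated objective: idiomatic
-- what changed: B merges both code tables into one combined tagged dict (2-char prefix -> (code, class)) built once, so identify_future does a single lookup followed by a class-compatibility check instead of A's branch-on-class followed by linear scans of one or two value lists; correct because the 17 prefixes are pairwise distinct.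
import Mathlib
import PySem

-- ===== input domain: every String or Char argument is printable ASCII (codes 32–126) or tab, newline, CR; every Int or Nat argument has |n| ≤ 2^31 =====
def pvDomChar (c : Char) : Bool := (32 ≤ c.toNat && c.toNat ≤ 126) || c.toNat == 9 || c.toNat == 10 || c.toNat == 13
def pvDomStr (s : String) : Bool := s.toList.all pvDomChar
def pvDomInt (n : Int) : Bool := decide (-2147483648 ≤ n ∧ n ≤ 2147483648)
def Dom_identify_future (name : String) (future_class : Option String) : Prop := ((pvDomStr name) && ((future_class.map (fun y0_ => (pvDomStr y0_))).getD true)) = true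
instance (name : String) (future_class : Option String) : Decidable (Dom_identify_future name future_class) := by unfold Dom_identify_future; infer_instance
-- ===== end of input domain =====

-- B replaces A's branch-on-class plus linear scans by ONE combined tagged
-- prefix table (prefix -> (code, class)) built once, a single lookup and a
-- class-compatibility check; return values proved equal on Pre_.

-- ===== PORT A =====
-- values() of FUTURES_EURO_INDICES / FUTURES_METALS, in insertion order
def pvIdxCodes : List String :=
  ["GX1 Index", "CF1 Index", "AJ1 Index", "ST1 Index",
   "EO1 Index", "PP1 Index", "IB1 Index", "BE1 Index"]

def pvMtlCodes : List String :=
  ["GC1 Comdty", "SI1 Comdty", "PL1 Comdty", "PA1 Comdty",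
   "LN1 Comdty", "LX1 Comdty", "LT1 Comdty", "LP1 Comdty", "LA1 Comdty"]

-- A's 'for future in …: if future[:2] == identifier: return future' loop
def pvScanA (codes : List String) (idf : List Char) : Option String :=
  match codes with
  | [] => none
  | c :: rest => if c.toList.take 2 = idf then some c else pvScanA rest idf

-- the body after the validity check; 'raise ValueError' at the end → "" (excluded by Pre_)
def pvBodyA (idf : List Char) (future_class : Option String) : String :=
  if future_class = some "INDEX" then
    ((pvScanA pvIdxCodes idf).getD "")
  else if future_class = some "METAL" then
    ((pvScanA pvMtlCodes idf).getD "")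
  else
    match pvScanA pvIdxCodes idf with
    | some r => r
    | none => (pvScanA pvMtlCodes idf).getD ""

def identify_future (name : String) (future_class : Option String) : String :=
  -- invalid future_class → raise ValueError → "" (excluded by Pre_)
  if future_class ≠ some "INDEX" ∧ future_class ≠ some "METAL" ∧ future_class ≠ none then ""
  else pvBodyA (name.toList.take 2) future_class

-- ===== PORT B =====
-- the combined tagged table _COMBINED = {v[:2]: (v, tag)} over both dicts
def pvCombined : List (List Char × String × String) :=
  [(['G','X'], "GX1 Index", "INDEX"), (['C','F'], "CF1 Index", "INDEX"),
   (['A','J'], "AJ1 Index", "INDEX"), (['S','T'], "ST1 Index", "INDEX"),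
   (['E','O'], "EO1 Index", "INDEX"), (['P','P'], "PP1 Index", "INDEX"),
   (['I','B'], "IB1 Index", "INDEX"), (['B','E'], "BE1 Index", "INDEX"),
   (['G','C'], "GC1 Comdty", "METAL"), (['S','I'], "SI1 Comdty", "METAL"),
   (['P','L'], "PL1 Comdty", "METAL"), (['P','A'], "PA1 Comdty", "METAL"),
   (['L','N'], "LN1 Comdty", "METAL"), (['L','X'], "LX1 Comdty", "METAL"),
   (['L','T'], "LT1 Comdty", "METAL"), (['L','P'], "LP1 Comdty", "METAL"),
   (['L','A'], "LA1 Comdty", "METAL")]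

-- '_COMBINED.get(key); if hit is not None and (fc is None or fc == hit[1]): return hit[0]'
def pvBodyB (key : List Char) (future_class : Option String) : String :=
  match pvCombined.lookup key with
  | some (code, tag) =>
    if future_class = none ∨ future_class = some tag then code
    else ""  -- raise ValueError (excluded by Pre_)
  | none => ""  -- raise ValueError (excluded by Pre_)

def identify_future_alt (name : String) (future_class : Option String) : String :=
  if future_class ≠ some "INDEX" ∧ future_class ≠ some "METAL" ∧ future_class ≠ none then ""
  else pvBodyB (name.toList.take 2) future_class

-- ===== PRECONDITION & SPEC =====
-- Pre_ holds exactly where Python A returns: a valid future_class and a 2-char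
-- prefix of name matching some code of the selected table(s); elsewhere A raises ValueError.
def Pre_identify_future (name : String) (future_class : Option String) : Prop :=
  if future_class = some "INDEX" then
    name.toList.take 2 ∈ pvIdxCodes.map (fun c => c.toList.take 2)
  else if future_class = some "METAL" then
    name.toList.take 2 ∈ pvMtlCodes.map (fun c => c.toList.take 2)
  else if future_class = none then
    name.toList.take 2 ∈ ((pvIdxCodes ++ pvMtlCodes).map (fun c => c.toList.take 2))
  else False

instance (name : String) (future_class : Option String) : Decidable (Pre_identify_future name future_class) := by
  unfold Pre_identify_future; infer_instance

def pvWitness_identify_future : String × Option String := ("GC1 Comdty", some "METAL")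

def Spec_identify_future (name : String) (future_class : Option String) (out : String) : Prop := out = identify_future_alt name future_class
instance (name : String) (future_class : Option String) (out : String) : Decidable (Spec_identify_future name future_class out) := by unfold Spec_identify_future; infer_instance

-- ===== CLAIM (what is proved, stated in full; the proofs are below) =====
def Claim_equal_identify_future : Prop := ∀ (name : String) (future_class : Option String), Dom_identify_future name future_class → Pre_identify_future name future_class → Spec_identify_future name future_class (identify_future name future_class)

-- ===== LEMMAS AND PROOFS =====

theorem pvAgree_index (k : List Char) (h : k ∈ pvIdxCodes.map (fun c => c.toList.take 2)) :
    pvBodyA k (some "INDEX") = pvBodyB k (some "INDEX") := by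
  fin_cases h <;> decide

theorem pvAgree_metal (k : List Char) (h : k ∈ pvMtlCodes.map (fun c => c.toList.take 2)) :
    pvBodyA k (some "METAL") = pvBodyB k (some "METAL") := by
  fin_cases h <;> decide

theorem pvAgree_none (k : List Char) (h : k ∈ ((pvIdxCodes ++ pvMtlCodes).map (fun c => c.toList.take 2))) :
    pvBodyA k none = pvBodyB k none := by
  fin_cases h <;> decide

-- ===== VERDICT (by name: the statement is the Claim_ definition above) =====
theorem identify_future_spec : Claim_equal_identify_future := by
  intro name future_class _ hPre
  unfold Spec_identify_future identify_future identify_future_alt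
  unfold Pre_identify_future at hPre
  by_cases hI : future_class = some "INDEX"
  · subst hI
    rw [if_neg (by simp), if_neg (by simp)]
    exact pvAgree_index _ hPre
  · by_cases hM : future_class = some "METAL"
    · subst hM
      rw [if_neg (by simp), if_pos rfl] at hPre
      rw [if_neg (by simp [hI]), if_neg (by simp [hI])]
      exact pvAgree_metal _ hPre
    · by_cases hN : future_class = none
      · subst hN
        rw [if_neg (by simp), if_neg (by simp), if_pos rfl] at hPre
        rw [if_neg (by simp [hI, hM]), if_neg (by simp [hI, hM])]
        exact pvAgree_none _ hPre
      · rw [if_neg hI, if_neg hM, if_neg hN] at hPre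
        exact absurd hPre not_false
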